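-- pv_equiv track=rewrite | github.com/Dr0x3525/Proyecto-final-programacion | ejercicios_parciales/ejercicio_parcial_2/ejercicio4.py | encontrar_fib_menor
-- ===== SOURCE A (Python) =====
-- def comprobar_ser_fibbonaci(numero):
--     numero = int(numero)
--     f1 = 0
--     f2 = 1
--     while f1 <= numero:
--         if f1 == numero:
--             return True
--         temp =  f1
--         f1 = f2
--         f2 = f1 + temp
--     return False
--
-- def encontrar_fib_menor(vector):
--     fib_menor = None
--     for indice in range(len(vector)):
--         if comprobar_ser_fibbonaci(vector[indice]):
--             if fib_menor == None:
--                 fib_menor = vector[indice]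
--             else:
--                 if fib_menor > vector[indice]:
--                     fib_menor = vector[indice]
--     return fib_menor
-- ===== SOURCE B (Python) =====
-- def encontrar_fib_menor(vector):
--     if not vector:
--         return None
--     fibs = set()
--     a, b = 0, 1
--     tope = max(vector)
--     while a <= tope:
--         fibs.add(a)
--         a, b = b, a + b
--     candidatos = [x for x in vector if x in fibs]
--     return min(candidatos) if candidatos else None
-- ===== Notes on version B (the rewrite author's own statement) =====
-- stated objective: faster
-- what changed: Instead of running an iterative Fibonacci check for every element, B generates the Fibonacci numbers up to max(vector) once into a set and returns min over the elements found in that set.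
import Mathlib
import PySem

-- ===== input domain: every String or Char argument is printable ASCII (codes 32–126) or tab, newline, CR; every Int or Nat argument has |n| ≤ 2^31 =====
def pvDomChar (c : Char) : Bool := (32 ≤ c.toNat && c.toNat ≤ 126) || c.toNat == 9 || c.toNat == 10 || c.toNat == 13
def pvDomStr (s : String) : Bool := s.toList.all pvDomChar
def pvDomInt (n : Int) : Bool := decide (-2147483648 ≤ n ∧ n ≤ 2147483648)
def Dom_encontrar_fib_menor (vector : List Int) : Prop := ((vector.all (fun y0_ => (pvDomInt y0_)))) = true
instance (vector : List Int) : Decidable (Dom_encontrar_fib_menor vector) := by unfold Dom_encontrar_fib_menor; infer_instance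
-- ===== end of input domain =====

-- B replaces A's per-element iterative Fibonacci test by one Fibonacci-generation pass into a set
-- (up to max(vector)) followed by a minimum over the elements found in it (return value only; no mutation).


-- ===== PORT A =====
-- A's while-loop 'f1, f2 = f2, f2 + f1' test; the invariant arguments (0 ≤ f1 ≤ f2, 1 ≤ f2 — true at
-- the only call site f1=0, f2=1 and preserved by the step) only serve termination.
def chkLoop (n f1 f2 : Int) (h1 : 0 ≤ f1) (_h2 : f1 ≤ f2) (h3 : 1 ≤ f2) : Bool :=
  if f1 ≤ n then
    if f1 = n then true
    else chkLoop n f2 (f2 + f1) (by omega) (by omega) (by omega)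
  else false
termination_by ((2*(n + 1 - f1)).toNat + (if f1 = f2 then 1 else 0))
decreasing_by split_ifs <;> omega

def comprobar_ser_fibbonaci (numero : Int) : Bool :=
  chkLoop numero 0 1 (by omega) (by omega) (by omega)

def encontrar_fib_menor (vector : List Int) : Option Int :=
  (PySem.List.pyRange 0 (vector.length : Int) 1).foldl
    (fun fib_menor indice =>
      if comprobar_ser_fibbonaci (PySem.List.pyGetD vector indice 0) then
        match fib_menor with
        | none => some (PySem.List.pyGetD vector indice 0)
        | some m =>
          if m > PySem.List.pyGetD vector indice 0 then some (PySem.List.pyGetD vector indice 0)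
          else fib_menor
      else fib_menor) none

-- ===== PORT B =====
-- B's 'while a <= tope: fibs.add(a); a, b = b, a + b' loop; invariant arguments as in chkLoop.
def genLoop (tope a b : Int) (s : PySem.Set Int) (h1 : 0 ≤ a) (_h2 : a ≤ b) (h3 : 1 ≤ b) : PySem.Set Int :=
  if a ≤ tope then genLoop tope b (b + a) (PySem.Set.add s a) (by omega) (by omega) (by omega)
  else s
termination_by ((2*(tope + 1 - a)).toNat + (if a = b then 1 else 0))
decreasing_by split_ifs <;> omega

def encontrar_fib_menor_alt (vector : List Int) : Option Int :=
  if vector = [] then none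
  else
    match PySem.List.max? vector (fun x => x) with
    | none => none   -- unreachable: max? is some on a non-empty list
    | some tope =>
      let fibs := genLoop tope 0 1 PySem.Set.empty (by omega) (by omega) (by omega)
      let candidatos := vector.filter (fun x => PySem.Set.contains fibs x)
      if candidatos = [] then none else PySem.List.min? candidatos (fun y => y)

-- ===== PRECONDITION & SPEC =====
def Spec_encontrar_fib_menor (vector : List Int) (out : Option Int) : Prop := out = encontrar_fib_menor_alt vector
instance (vector : List Int) (out : Option Int) : Decidable (Spec_encontrar_fib_menor vector out) := by unfold Spec_encontrar_fib_menor; infer_instance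

-- ===== CLAIM (what is proved, stated in full; the proofs are below) =====
def Claim_equal_encontrar_fib_menor : Prop := ∀ (vector : List Int), Dom_encontrar_fib_menor vector → Spec_encontrar_fib_menor vector (encontrar_fib_menor vector)

-- ===== LEMMAS AND PROOFS =====

-- A's fold body, with the element already fetched (the pyGetD bridge supplies it).
def stepA (fib_menor : Option Int) (v : Int) : Option Int :=
  if comprobar_ser_fibbonaci v then
    match fib_menor with
    | none => some v
    | some m => if m > v then some v else fib_menor
  else fib_menor

lemma chkLoop_false_of_lt (n f1 f2 : Int) (h1 : 0 ≤ f1) (h2 : f1 ≤ f2) (h3 : 1 ≤ f2)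
    (h : n < f1) : chkLoop n f1 f2 h1 h2 h3 = false := by
  rw [chkLoop]
  simp [show ¬ (f1 ≤ n) by omega]

-- n is produced by A's check loop iff the generation loop from the same state puts it into the set.
lemma mem_genLoop_iff (n tope a b : Int) (s : PySem.Set Int)
    (h1 : 0 ≤ a) (h2 : a ≤ b) (h3 : 1 ≤ b) (hn : n ≤ tope) :
    n ∈ genLoop tope a b s h1 h2 h3 ↔ n ∈ s ∨ chkLoop n a b h1 h2 h3 = true := by
  induction a, b, s, h1, h2, h3 using genLoop.induct (tope := tope) with
  | case1 a b s h1 h2 h3 hle ih =>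
    rw [genLoop, chkLoop]
    simp only [if_pos hle]
    rw [ih]
    rw [PySem.Set.mem_add]
    by_cases hna : a ≤ n
    · by_cases hea : a = n
      · simp [hea]
      · simp only [if_pos hna, if_neg hea]
        constructor
        · rintro (⟨hs | hb⟩ | hc)
          · exact Or.inl hs
          · exact absurd hb.symm hea
          · exact Or.inr hc
        · rintro (hs | hc)
          · exact Or.inl (Or.inl hs)
          · exact Or.inr hc
    · -- n < a: the check fails now and in one more step; a is not n
      have hf : chkLoop n b (b + a) (by omega) (by omega) (by omega) = false :=
        chkLoop_false_of_lt n b (b + a) (by omega) (by omega) (by omega) (by omega)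
      simp only [if_neg hna, hf, Bool.false_eq_true, or_false]
      constructor
      · rintro (hs | hb)
        · exact hs
        · omega
      · exact fun hs => Or.inl hs
  | case2 a b s h1 h2 h3 hgt =>
    rw [genLoop, chkLoop]
    simp [show ¬ (a ≤ tope) by omega, show ¬ (a ≤ n) by omega]

lemma foldl_stepA_some (xs : List Int) : ∀ (m : Int),
    xs.foldl stepA (some m) = some ((xs.filter comprobar_ser_fibbonaci).foldl min m) := by
  induction xs with
  | nil => intro m; simp
  | cons x xs ih =>
    intro m
    by_cases hp : comprobar_ser_fibbonaci x
    · have hstep : stepA (some m) x = some (min m x) := by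
        simp only [stepA, if_pos hp]
        by_cases hmx : m > x
        · simp [if_pos hmx, min_def]; omega
        · simp [if_neg hmx, min_def]; omega
      simp [List.foldl_cons, hstep, hp, ih]
    · simp only [List.foldl_cons, stepA, List.filter_cons, if_neg hp, ih]

lemma foldl_stepA_none (xs : List Int) :
    xs.foldl stepA none = PySem.List.min? (xs.filter comprobar_ser_fibbonaci) (fun y => y) := by
  induction xs with
  | nil => simp [PySem.List.min?]
  | cons x xs ih =>
    by_cases hp : comprobar_ser_fibbonaci x
    · have hstep : stepA none x = some x := by simp [stepA, hp]
      rw [List.foldl_cons, hstep, foldl_stepA_some, List.filter_cons, if_pos hp,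
        PySem.List.min?_id_cons]
    · rw [List.foldl_cons, List.filter_cons, if_neg hp]
      simpa [stepA, hp] using ih

-- ===== VERDICT (by name: the statement is the Claim_ definition above) =====
theorem encontrar_fib_menor_spec : Claim_equal_encontrar_fib_menor := by
  intro vector _
  unfold Spec_encontrar_fib_menor
  by_cases hnil : vector = []
  · subst hnil
    simp [encontrar_fib_menor, encontrar_fib_menor_alt, PySem.List.pyRange]
  · have hA : encontrar_fib_menor vector = vector.foldl stepA none :=
      PySem.List.foldl_pyRange_zero_pyGetD' vector 0 stepA none
    rw [hA, foldl_stepA_none]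
    unfold encontrar_fib_menor_alt
    rw [if_neg hnil]
    rcases hmax : PySem.List.max? vector (fun x => x) with _ | tope
    · exact absurd ((PySem.List.max?_eq_none_iff vector _).mp hmax) hnil
    · simp only
      have hfilter : vector.filter comprobar_ser_fibbonaci =
          vector.filter (fun x =>
            PySem.Set.contains (genLoop tope 0 1 PySem.Set.empty (by omega) (by omega) (by omega)) x) := by
        apply List.filter_congr
        intro x hx
        have hle : x ≤ tope := PySem.List.max?_isMax hmax x hx
        have hmem := mem_genLoop_iff x tope 0 1 PySem.Set.empty (by omega) (by omega) (by omega) hle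
        rw [Bool.eq_iff_iff, PySem.Set.contains_iff, hmem]
        unfold comprobar_ser_fibbonaci
        simp only [PySem.Set.empty, List.not_mem_nil, false_or]
      rw [← hfilter]
      by_cases hcand : vector.filter comprobar_ser_fibbonaci = []
      · rw [if_pos hcand, hcand]; simp [PySem.List.min?]
      · rw [if_neg hcand]
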